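-- pv_equiv track=rewrite | github.com/Shin123/Fullstack-CRM-FastApi-ReactJs | backend/app/crud.py | _extract_slug_base
-- ===== SOURCE A (Python) =====
-- HEX_DIGITS = set("0123456789abcdef")
--
-- def _extract_slug_base(slug: str) -> str:
--     base, separator, suffix = slug.rpartition("-")
--     if (
--         separator
--         and len(suffix) == 5
--         and all(ch in HEX_DIGITS for ch in suffix.lower())
--     ):
--         return base
--     return slug
-- ===== SOURCE B (Python) =====
-- import re
--
-- _SUFFIX_RE = re.compile(r'-[0-9a-fA-F]{5}\Z')
--
--
-- def _extract_slug_base(slug: str) -> str: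
--     return _SUFFIX_RE.sub('', slug)
-- ===== Notes on version B (the rewrite author's own statement) =====
-- stated objective: idiomatic
-- what changed: Replaces A's rpartition plus length/lowercase/membership verification with a single compiled regex that strips a trailing '-' followed by exactly 5 hex digits (anchored with \Z, case-insensitive character class).
import Mathlib
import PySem

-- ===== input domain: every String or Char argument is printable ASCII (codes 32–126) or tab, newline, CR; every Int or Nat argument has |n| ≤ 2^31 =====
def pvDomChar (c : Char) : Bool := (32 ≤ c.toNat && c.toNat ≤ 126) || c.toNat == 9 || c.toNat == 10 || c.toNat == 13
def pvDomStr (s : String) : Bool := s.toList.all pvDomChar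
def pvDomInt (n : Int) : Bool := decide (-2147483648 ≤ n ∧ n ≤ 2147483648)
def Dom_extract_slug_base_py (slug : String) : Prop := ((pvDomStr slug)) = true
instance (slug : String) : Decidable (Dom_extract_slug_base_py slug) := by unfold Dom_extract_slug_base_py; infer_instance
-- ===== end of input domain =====

-- B replaces A's rpartition + length/lowercase/membership verification by a single anchored
-- regex r'-[0-9a-fA-F]{5}\Z' (idiomatic); both return the same string on every Dom input.


-- ===== PORT A =====
-- HEX_DIGITS = set("0123456789abcdef"); 'ch in HEX_DIGITS' ported as list membership (exact)
def pvHexDigits : List Char :=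
  ['0', '1', '2', '3', '4', '5', '6', '7', '8', '9', 'a', 'b', 'c', 'd', 'e', 'f']

-- hand port of str.rpartition("-") for the single-char separator A uses (exact):
-- none when '-' does not occur (Python then returns ('', '', slug), whose separator is falsy),
-- otherwise some (base, suffix) split at the LAST '-'.
def pvRPartDash : List Char → Option (List Char × List Char)
  | [] => none
  | c :: cs =>
    match pvRPartDash cs with
    | some (b, s) => some (c :: b, s)
    | none => if c = '-' then some ([], cs) else none

def extract_slug_base_py (slug : String) : String :=
  match pvRPartDash slug.toList with
  | none => slug
  | some (base, suffix) =>
    if suffix.length == 5 && (PySem.Chars.lower suffix).all (fun ch => pvHexDigits.contains ch) then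
      String.ofList base
    else slug

-- ===== PORT B =====
-- the regex character class [0-9a-fA-F]
def isHexB (c : Char) : Bool :=
  ['0', '1', '2', '3', '4', '5', '6', '7', '8', '9', 'a', 'b', 'c', 'd', 'e', 'f',
   'A', 'B', 'C', 'D', 'E', 'F'].contains c

-- hand port of re.sub(r'-[0-9a-fA-F]{5}\Z', '', slug) (exact): the end-anchored pattern matches
-- iff the 6th character from the end is '-' and the last 5 characters are in the class; on a
-- match the matched tail is removed, otherwise the string is returned unchanged.
def extract_slug_base_py_alt (slug : String) : String :=
  let r := slug.toList.reverse
  if r[5]? == some '-' && (r.take 5).all isHexB then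
    String.ofList (r.drop 6).reverse
  else slug

-- ===== PRECONDITION & SPEC =====
def Spec_extract_slug_base_py (slug : String) (out : String) : Prop := out = extract_slug_base_py_alt slug
instance (slug : String) (out : String) : Decidable (Spec_extract_slug_base_py slug out) := by unfold Spec_extract_slug_base_py; infer_instance

-- ===== CLAIM (what is proved, stated in full; the proofs are below) =====
def Claim_equal_extract_slug_base_py : Prop := ∀ (slug : String), Dom_extract_slug_base_py slug → Spec_extract_slug_base_py slug (extract_slug_base_py slug)

-- ===== LEMMAS AND PROOFS =====

-- for ASCII chars, lowercasing then testing against the 16 lowercase hex digits equals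
-- testing directly against the regex class [0-9a-fA-F]
theorem hexLower_eq (c : Char) (hc : c.toNat ≤ 126) :
    pvHexDigits.contains (PySem.Chars.lowerChar c) = isHexB c := by
  obtain ⟨n, hn, rfl⟩ : ∃ n, n ≤ 126 ∧ Char.ofNat n = c := ⟨c.toNat, hc, Char.ofNat_toNat c⟩
  interval_cases n <;> decide

theorem lower_all_hex (s : List Char) (hs : ∀ c ∈ s, c.toNat ≤ 126) :
    (PySem.Chars.lower s).all (fun ch => pvHexDigits.contains ch) = s.all isHexB := by
  simp only [PySem.Chars.lower, List.all_map]
  rw [Bool.eq_iff_iff, List.all_eq_true, List.all_eq_true]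
  constructor <;> intro h c hc
  · rw [← hexLower_eq c (hs c hc)]
    exact h c hc
  · have hx : pvHexDigits.contains (PySem.Chars.lowerChar c) = true := by
      rw [hexLower_eq c (hs c hc)]
      exact h c hc
    simpa using hx

theorem rpartDash_none {l : List Char} (h : pvRPartDash l = none) : '-' ∉ l := by
  induction l with
  | nil => simp
  | cons c cs ih =>
    rcases hcs : pvRPartDash cs with _ | p
    · simp only [pvRPartDash, hcs] at h
      split_ifs at h with hc
      simp only [List.mem_cons]
      rintro (rfl | hm)
      · exact hc rfl
      · exact ih hcs hm
    · simp [pvRPartDash, hcs] at h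

theorem rpartDash_some {l b s : List Char} (h : pvRPartDash l = some (b, s)) :
    l = b ++ '-' :: s ∧ '-' ∉ s := by
  induction l generalizing b with
  | nil => exact absurd h (by simp [pvRPartDash])
  | cons c cs ih =>
    rcases hcs : pvRPartDash cs with _ | ⟨b', s'⟩
    · simp only [pvRPartDash, hcs] at h
      split_ifs at h with hc
      simp only [Option.some.injEq, Prod.mk.injEq] at h
      obtain ⟨rfl, rfl⟩ := h
      subst hc
      exact ⟨by simp, rpartDash_none hcs⟩
    · simp only [pvRPartDash, hcs, Option.some.injEq, Prod.mk.injEq] at h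
      obtain ⟨hb, hsx⟩ := h
      subst hb
      subst hsx
      obtain ⟨he2, hn2⟩ := ih hcs
      exact ⟨by simp [he2], hn2⟩

theorem drop_append_len {α : Type} (xs ys : List α) (n : Nat) (h : xs.length ≤ n) :
    (xs ++ ys).drop n = ys.drop (n - xs.length) := by
  induction xs generalizing n with
  | nil => simp
  | cons x xs ih =>
    cases n with
    | zero => simp at h
    | succ n => simpa using ih n (by simpa using h)

theorem portA_none (slug : String) (h : pvRPartDash slug.toList = none) :
    extract_slug_base_py slug = slug := by
  unfold extract_slug_base_py
  rw [h]

theorem portA_some (slug : String) (b s : List Char) (h : pvRPartDash slug.toList = some (b, s)) :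
    extract_slug_base_py slug =
      if s.length == 5 && (PySem.Chars.lower s).all (fun ch => pvHexDigits.contains ch) then
        String.ofList b
      else slug := by
  unfold extract_slug_base_py
  rw [h]

theorem portB (slug : String) :
    extract_slug_base_py_alt slug =
      if slug.toList.reverse[5]? == some '-' && (slug.toList.reverse.take 5).all isHexB then
        String.ofList (slug.toList.reverse.drop 6).reverse
      else slug := rfl

-- ===== VERDICT (by name: the statement is the Claim_ definition above) =====
theorem extract_slug_base_py_spec : Claim_equal_extract_slug_base_py := by
  intro slug hdom
  show extract_slug_base_py slug = extract_slug_base_py_alt slug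
  rcases h : pvRPartDash slug.toList with _ | ⟨b, s⟩
  · -- '-' does not occur in slug: A returns slug, B's pattern cannot match
    have hnm : '-' ∉ slug.toList := rpartDash_none h
    rw [portA_none slug h, portB slug, if_neg]
    simp only [Bool.and_eq_true, beq_iff_eq]
    rintro ⟨h1, _⟩
    exact hnm (List.mem_reverse.mp (List.mem_of_getElem? h1))
  · obtain ⟨he, hns⟩ := rpartDash_some h
    have hs : ∀ c ∈ s, c.toNat ≤ 126 := by
      intro c hc
      have hmem : c ∈ slug.toList := by
        rw [he]
        exact List.mem_append_right _ (List.mem_cons_of_mem _ hc)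
      have := List.all_eq_true.mp hdom c hmem
      simp only [pvDomChar, Bool.or_eq_true, Bool.and_eq_true, decide_eq_true_eq,
        Nat.le_iff_lt_or_eq, beq_iff_eq] at this ⊢
      omega
    rw [portA_some slug b s h, portB slug, lower_all_hex s hs, he]
    have hrev : (b ++ '-' :: s).reverse = s.reverse ++ '-' :: b.reverse := by simp
    rw [hrev]
    have h5 : s.reverse.length = s.length := by simp
    by_cases hA : s.length = 5 ∧ s.all isHexB = true
    · -- A strips the suffix; B's pattern matches and strips the same suffix
      obtain ⟨hlen, hhex⟩ := hA
      have hidx : (s.reverse ++ '-' :: b.reverse)[5]? = some '-' := by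
        rw [List.getElem?_append_right (by omega)]
        simp [h5, hlen]
      have htake : (s.reverse ++ '-' :: b.reverse).take 5 = s.reverse := by
        conv_lhs => rw [show (5 : Nat) = s.reverse.length by omega]
        exact List.take_left
      have hdrop : (s.reverse ++ '-' :: b.reverse).drop 6 = b.reverse := by
        rw [drop_append_len _ _ 6 (by omega)]
        simp [h5, hlen]
      rw [if_pos (by simp [hlen, hhex]), if_pos
        (by simp only [hidx, htake, List.all_reverse, hhex, beq_self_eq_true, Bool.and_self])]
      rw [hdrop, List.reverse_reverse]
    · -- A keeps slug; B's pattern cannot match either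
      rw [if_neg (by
        simp only [Bool.and_eq_true, beq_iff_eq]
        rintro ⟨h1, h2⟩
        exact hA ⟨h1, h2⟩), if_neg]
      simp only [Bool.and_eq_true, beq_iff_eq]
      rintro ⟨hidx, hhex⟩
      rcases lt_trichotomy s.length 5 with hlt | heq | hgt
      · -- the '-' would sit among the last 5 characters, but '-' is not in the class
        have hdd : (s.reverse ++ '-' :: b.reverse)[s.length]? = some '-' := by
          rw [List.getElem?_append_right (by omega)]
          simp [h5]
        have ht : ((s.reverse ++ '-' :: b.reverse).take 5)[s.length]? = some '-' := by
          rw [List.getElem?_take, if_pos hlt]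
          exact hdd
        have hmem : '-' ∈ (s.reverse ++ '-' :: b.reverse).take 5 := List.mem_of_getElem? ht
        have := List.all_eq_true.mp hhex _ hmem
        simp [isHexB] at this
      · -- exactly 5 suffix chars, all in the class: contradicts A's test failing
        have htake : (s.reverse ++ '-' :: b.reverse).take 5 = s.reverse := by
          conv_lhs => rw [show (5 : Nat) = s.reverse.length by omega]
          exact List.take_left
        rw [htake, List.all_reverse] at hhex
        exact hA ⟨heq, hhex⟩
      · -- the 6th char from the end lies inside the suffix, which contains no '-'
        have heq5 : (s.reverse ++ '-' :: b.reverse)[5]? = s.reverse[5]? :=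
          List.getElem?_append_left (by omega)
        rw [heq5] at hidx
        exact hns (List.mem_reverse.mp (List.mem_of_getElem? hidx))
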